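-- pv_equiv track=rewrite | github.com/Krugger1982/24_1_squirrel | Football.py | Football
-- ===== SOURCE A (Python) =====
-- def Football(F, N):
--     A = sorted(F)
--     temp = []
--     B = []                    # Список цепочек несовпадений
--     M = 0                     # Счтчик  несовпадений в очередной цепочке
--     for i in range(N):
--         if A[i] != F[i]:
--             M += 1
--             temp.append(F[i])
--         elif M > 0:
--             B.append(temp)
--             M = 0
--             temp = []
--     if len(temp) > 0:
--         B.append(temp)
--     if len(B) == 1:                            # Если цепочка одна, то проверяем "B.reverse == B.sort" (критерий приема № 2)
--         B1 = B[0][:]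
--         B1.reverse()
--         B2 = B[0] [:]
--         B2.sort()
--         return B1 == B2
--     elif len(B) == 2:                          # Если есть только 2 единичные цепочки то можно применить прием № 1
--         return len(B[0]) == 1 and len(B[1]) == 1
--     return False
-- ===== SOURCE B (Python) =====
-- def Football(F, N):
--     # One linear pass over sorted(F) vs F with a 4-state machine; no chain lists are built.
--     # States: 0 = no mismatch yet, 1 = inside the first mismatch run (prev = previous
--     # mismatched value, ok = run non-increasing so far, single1 = run has length 1),
--     # 2 = first run closed, 3 = a second singleton mismatch seen.
--     S = sorted(F)
--     state = 0
--     prev = 0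
--     single1 = True
--     ok = True
--     for i in range(N):
--         if S[i] == F[i]:
--             if state == 1:
--                 state = 2
--         else:
--             if state == 0:
--                 state = 1
--                 single1 = True
--             elif state == 1:
--                 single1 = False
--                 if F[i] > prev:
--                     ok = False
--             elif state == 2:
--                 if not single1:
--                     return False
--                 state = 3
--             else:
--                 return False
--             prev = F[i]
--     if state == 0:
--         return False
--     if state == 3:
--         return True
--     return ok
-- ===== Notes on version B (the rewrite author's own statement) =====
-- stated objective: alternative
-- what changed: A materialises the mismatch runs as lists of lists (temp/B) and inspects them afterwards; B never builds any chain: it runs a 4-state finite-state machine in one pass over sorted(F) vs F, tracking only (state, previous mismatched value, run-is-singleton flag, non-increasing flag) and returning early as soon as the configuration is hopeless.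
import Mathlib
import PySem

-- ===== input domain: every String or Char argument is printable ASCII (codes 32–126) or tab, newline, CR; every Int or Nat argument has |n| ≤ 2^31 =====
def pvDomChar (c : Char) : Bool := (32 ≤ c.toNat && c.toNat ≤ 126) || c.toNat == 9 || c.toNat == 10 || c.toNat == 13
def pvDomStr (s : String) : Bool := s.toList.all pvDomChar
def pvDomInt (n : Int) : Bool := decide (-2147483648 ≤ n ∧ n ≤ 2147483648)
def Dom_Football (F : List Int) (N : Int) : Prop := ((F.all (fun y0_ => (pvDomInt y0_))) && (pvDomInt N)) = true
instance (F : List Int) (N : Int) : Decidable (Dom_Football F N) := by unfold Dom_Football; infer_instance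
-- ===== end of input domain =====

-- B replaces A's chain-collecting pass (lists of mismatch runs inspected afterwards) by a
-- single 4-state finite-state machine with O(1) state and early exit; objective: alternative.
-- Only the RETURN value is compared (neither side mutates its input).

-- ===== PORT A =====
def Football (F : List Int) (N : Int) : Bool :=
  let A := PySem.List.sorted F (fun x => x) false
  let st := (PySem.List.pyRange 0 N 1).foldl
    (fun (st : List Int × List (List Int) × Int) i =>
      if PySem.List.pyGetD A i 0 ≠ PySem.List.pyGetD F i 0 then
        (st.1 ++ [PySem.List.pyGetD F i 0], st.2.1, st.2.2 + 1)
      else if st.2.2 > 0 then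
        ([], st.2.1 ++ [st.1], 0)
      else st)
    ([], [], 0)
  let Bl := if st.1.length > 0 then st.2.1 ++ [st.1] else st.2.1
  if Bl.length = 1 then
    decide ((PySem.List.pyGetD Bl 0 []).reverse = PySem.List.sorted (PySem.List.pyGetD Bl 0 []) (fun x => x) false)
  else if Bl.length = 2 then
    decide ((PySem.List.pyGetD Bl 0 []).length = 1) && decide ((PySem.List.pyGetD Bl 1 []).length = 1)
  else false

-- ===== PORT B =====
-- Source B's loop with early return: states 0 = no mismatch yet, 1 = inside first run,
-- 2 = first run closed, 3 = second singleton mismatch seen.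
def footballLoop (S F : List Int) (state prev : Int) (single1 ok : Bool) : List Int → Bool
  | [] => if state = 0 then false else if state = 3 then true else ok
  | i :: rest =>
    if PySem.List.pyGetD S i 0 = PySem.List.pyGetD F i 0 then
      footballLoop S F (if state = 1 then 2 else state) prev single1 ok rest
    else if state = 0 then
      footballLoop S F 1 (PySem.List.pyGetD F i 0) true ok rest
    else if state = 1 then
      footballLoop S F 1 (PySem.List.pyGetD F i 0) false
        (if PySem.List.pyGetD F i 0 > prev then false else ok) rest
    else if state = 2 then
      (if single1 then footballLoop S F 3 (PySem.List.pyGetD F i 0) single1 ok rest else false)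
    else false

def Football_alt (F : List Int) (N : Int) : Bool :=
  footballLoop (PySem.List.sorted F (fun x => x) false) F 0 0 true true (PySem.List.pyRange 0 N 1)

-- ===== PRECONDITION & SPEC =====
-- A indexes sorted(F)[i] for every i in range(N): when N > len(F) Python raises
-- IndexError, so exactly those inputs are excluded (negative N is fine: empty loop).
def Pre_Football (F : List Int) (N : Int) : Prop := N ≤ (F.length : Int)
instance (F : List Int) (N : Int) : Decidable (Pre_Football F N) := by unfold Pre_Football; infer_instance
def pvWitness_Football : List Int × Int := ([2, 1, 3], 3)

def Spec_Football (F : List Int) (N : Int) (out : Bool) : Prop := out = Football_alt F N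
instance (F : List Int) (N : Int) (out : Bool) : Decidable (Spec_Football F N out) := by unfold Spec_Football; infer_instance

-- ===== CLAIM (what is proved, stated in full; the proofs are below) =====
def Claim_equal_Football : Prop := ∀ (F : List Int) (N : Int), Dom_Football F N → Pre_Football F N → Spec_Football F N (Football F N)

-- ===== LEMMAS AND PROOFS =====

-- the mismatch predicate: position k disagrees between sorted(F) and F
def pvP (S F : List Int) (k : Nat) : Bool := decide (S.getD k 0 ≠ F.getD k 0)
-- A's open chain of mismatch positions after processing range(n)
def pvTmp (S F : List Int) : Nat → List Nat
  | 0 => []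
  | k + 1 => if pvP S F k then pvTmp S F k ++ [k] else []
-- A's closed chains of mismatch positions after processing range(n)
def pvCh (S F : List Int) : Nat → List (List Nat)
  | 0 => []
  | k + 1 => if pvP S F k then pvCh S F k
             else if pvTmp S F k = [] then pvCh S F k
             else pvCh S F k ++ [pvTmp S F k]
-- all chains, including the trailing open one
def pvAll (S F : List Int) (n : Nat) : List (List Nat) :=
  pvCh S F n ++ (if pvTmp S F n = [] then [] else [pvTmp S F n])
-- the values of a chain of positions
def pvVals (F : List Int) (l : List Nat) : List Int := l.map (fun j => F.getD j 0)

theorem pvFoldA (S F : List Int) (n : Nat) :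
    (List.range n).foldl
      (fun (st : List Int × List (List Int) × Int) k =>
        if S.getD k 0 ≠ F.getD k 0 then
          (st.1 ++ [F.getD k 0], st.2.1, st.2.2 + 1)
        else if st.2.2 > 0 then
          ([], st.2.1 ++ [st.1], 0)
        else st)
      ([], [], 0)
    = (pvVals F (pvTmp S F n),
       (pvCh S F n).map (pvVals F),
       ((pvTmp S F n).length : Int)) := by
  induction n with
  | zero => simp [pvTmp, pvCh, pvVals]
  | succ k ih =>
    rw [List.range_succ, List.foldl_append, ih]
    simp only [List.foldl_cons, List.foldl_nil]
    split_ifs with h1 h2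
    · have hp : pvP S F k = true := decide_eq_true h1
      simp [pvTmp, pvCh, pvVals, hp]
    · have hp : pvP S F k = false := decide_eq_false h1
      have ht : pvTmp S F k ≠ [] := by
        intro h0
        rw [h0] at h2
        simp at h2
      simp [pvTmp, pvCh, pvVals, hp, ht]
    · have hp : pvP S F k = false := decide_eq_false h1
      have ht : pvTmp S F k = [] := by
        have : (pvTmp S F k).length = 0 := by omega
        exact List.eq_nil_of_length_eq_zero this
      simp [pvTmp, pvCh, pvVals, hp, ht]

-- the state machine, over Nat indices (proof-side mirror of footballLoop's steps,
-- returning the final state instead of applying the exit classification)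
def pvRunB (S F : List Int) : List Nat → Int × Int × Bool × Bool → Sum Bool (Int × Int × Bool × Bool)
  | [], st => Sum.inr st
  | i :: rest, (state, prev, single1, ok) =>
    if S.getD i 0 = F.getD i 0 then
      pvRunB S F rest ((if state = 1 then 2 else state), prev, single1, ok)
    else if state = 0 then
      pvRunB S F rest (1, F.getD i 0, true, ok)
    else if state = 1 then
      pvRunB S F rest (1, F.getD i 0, false, (if F.getD i 0 > prev then false else ok))
    else if state = 2 then
      (if single1 then pvRunB S F rest (3, F.getD i 0, single1, ok) else Sum.inl false)
    else Sum.inl false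

def pvFinish : Sum Bool (Int × Int × Bool × Bool) → Bool
  | Sum.inl b => b
  | Sum.inr (state, _, _, ok) => if state = 0 then false else if state = 3 then true else ok

def pvInit : Int × Int × Bool × Bool := (0, 0, true, true)

-- the "hopeless" configurations: ≥ 3 chains, or 2 chains not both singletons
def pvBad (S F : List Int) (n : Nat) : Prop :=
  3 ≤ (pvAll S F n).length ∨
  ((pvAll S F n).length = 2 ∧
    ¬(((pvAll S F n).getD 0 []).length = 1 ∧ ((pvAll S F n).getD 1 []).length = 1))

theorem pvLoop_eq (S F : List Int) (l : List Nat) (state prev : Int) (s1 ok : Bool) :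
    footballLoop S F state prev s1 ok (l.map (fun (k : Nat) => (k : Int)))
      = pvFinish (pvRunB S F l (state, prev, s1, ok)) := by
  induction l generalizing state prev s1 ok with
  | nil => rfl
  | cons i t ih =>
    rw [List.map_cons]
    rw [footballLoop, pvRunB]
    simp only [PySem.List.pyGetD_natCast]
    split_ifs <;> first | exact ih .. | (rw [pvFinish])

theorem pvRunB_append (S F : List Int) (l l' : List Nat) (st : Int × Int × Bool × Bool) :
    pvRunB S F (l ++ l') st
      = match pvRunB S F l st with
        | Sum.inl b => Sum.inl b
        | Sum.inr st' => pvRunB S F l' st' := by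
  induction l generalizing st with
  | nil => rfl
  | cons i t ih =>
    obtain ⟨state, prev, s1, ok⟩ := st
    simp only [List.cons_append, pvRunB]
    split_ifs <;> simp [ih]

theorem pvPairLast (v : List Int) (hv : v ≠ []) (h : v.Pairwise (· ≥ ·)) :
    ∀ a ∈ v, a ≥ v.getLast hv := by
  intro a ha
  obtain ⟨i, hi, rfl⟩ := List.mem_iff_getElem.mp ha
  rw [List.getLast_eq_getElem]
  have hp := List.pairwise_iff_getElem.mp h
  rcases Nat.lt_or_ge i (v.length - 1) with h0 | h0
  · exact hp i (v.length - 1) hi (by omega) h0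
  · have hie : i = v.length - 1 := by omega
    simp [hie]

theorem pvPairConcat (v : List Int) (x : Int) (hv : v ≠ []) :
    decide ((v ++ [x]).Pairwise (· ≥ ·))
      = if x > v.getLast hv then false else decide (v.Pairwise (· ≥ ·)) := by
  split_ifs with h
  · rw [decide_eq_false_iff_not]
    intro hp
    have := ((List.pairwise_append.mp hp).2.2) (v.getLast hv) (List.getLast_mem hv) x (by simp)
    omega
  · apply Bool.eq_iff_iff.mpr
    rw [decide_eq_true_eq, decide_eq_true_eq]
    constructor
    · intro hp
      exact hp.sublist (List.sublist_append_left v [x])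
    · intro hp
      rw [List.pairwise_append]
      refine ⟨hp, by simp, ?_⟩
      intro a ha b hb
      simp only [List.mem_singleton] at hb
      subst hb
      have := pvPairLast v hv hp a ha
      omega

theorem pvTmp_getLast (S F : List Int) (n : Nat) (h : pvTmp S F n ≠ []) :
    (pvTmp S F n).getLast h = n - 1 := by
  cases n with
  | zero => exact absurd rfl h
  | succ m =>
    by_cases hp : pvP S F m = true
    · simp only [pvTmp, hp, if_true]
      rw [List.getLast_append_singleton]
      simp
    · exfalso
      apply h
      simp [pvTmp, hp]

theorem pvVals_getLast (F : List Int) (l : List Nat) (h : l ≠ []) :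
    (pvVals F l).getLast (by simp [pvVals, h]) = F.getD (l.getLast h) 0 := by
  simp [pvVals, List.getLast_map]

theorem pvBad_succ (S F : List Int) (n : Nat) (h : pvBad S F n) : pvBad S F (n + 1) := by
  by_cases hp : pvP S F n = true
  · have hA : pvAll S F (n + 1) = pvCh S F n ++ [pvTmp S F n ++ [n]] := by
      have h1 : pvTmp S F (n + 1) = pvTmp S F n ++ [n] := by simp [pvTmp, hp]
      have h2 : pvCh S F (n + 1) = pvCh S F n := by simp [pvCh, hp]
      simp [pvAll, h1, h2]
    by_cases hT : pvTmp S F n = []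
    · have hAn : pvAll S F n = pvCh S F n := by simp [pvAll, hT]
      unfold pvBad at *
      rw [hA, hT]
      rw [hAn] at h
      left
      rcases h with h | ⟨h2, _⟩ <;> simp <;> omega
    · have hAn : pvAll S F n = pvCh S F n ++ [pvTmp S F n] := by simp [pvAll, hT]
      unfold pvBad at *
      rw [hA]
      rw [hAn] at h
      rcases h with h | ⟨h2, h3⟩
      · left; simp at h ⊢; omega
      · right
        have hC1 : (pvCh S F n).length = 1 := by simp at h2; omega
        obtain ⟨c0, hc0⟩ := List.length_eq_one_iff.mp hC1
        rw [hc0]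
        rw [hc0] at h3
        constructor
        · simp
        · rintro ⟨hx, habs⟩
          apply hT
          cases hTT : pvTmp S F n with
          | nil => rfl
          | cons a l =>
            rw [hTT] at habs
            simp at habs
  · have hA : pvAll S F (n + 1) = pvAll S F n := by
      have h1 : pvTmp S F (n + 1) = [] := by simp [pvTmp, hp]
      have h2 : pvCh S F (n + 1) = pvCh S F n ++ (if pvTmp S F n = [] then [] else [pvTmp S F n]) := by
        by_cases hT : pvTmp S F n = [] <;> simp [pvCh, hp, hT]
      simp [pvAll, h1, h2]
    unfold pvBad at *
    rw [hA]
    exact h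

-- the loop invariant: after processing range(n), the machine state is determined by
-- A's chain configuration (pvCh, pvTmp)
theorem pvInv (S F : List Int) (n : Nat) :
    (pvCh S F n = [] ∧ pvTmp S F n = [] ∧
      pvRunB S F (List.range n) pvInit = Sum.inr pvInit)
  ∨ (pvCh S F n = [] ∧ pvTmp S F n ≠ [] ∧
      pvRunB S F (List.range n) pvInit
        = Sum.inr (1, F.getD (n - 1) 0, decide ((pvTmp S F n).length = 1),
            decide ((pvVals F (pvTmp S F n)).Pairwise (· ≥ ·))))
  ∨ (∃ c p, pvCh S F n = [c] ∧ pvTmp S F n = [] ∧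
      pvRunB S F (List.range n) pvInit
        = Sum.inr (2, p, decide (c.length = 1), decide ((pvVals F c).Pairwise (· ≥ ·))))
  ∨ (((∃ c, pvCh S F n = [c] ∧ c.length = 1 ∧ (pvTmp S F n).length = 1)
      ∨ (∃ c t, pvCh S F n = [c, t] ∧ c.length = 1 ∧ t.length = 1 ∧ pvTmp S F n = []))
     ∧ ∃ p s o, pvRunB S F (List.range n) pvInit = Sum.inr (3, p, s, o))
  ∨ (pvBad S F n ∧ pvRunB S F (List.range n) pvInit = Sum.inl false) := by
  induction n with
  | zero =>
    left
    exact ⟨rfl, rfl, rfl⟩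
  | succ k ih =>
    rw [List.range_succ]
    by_cases hp : pvP S F k = true
    · have hcond : ¬(S.getD k 0 = F.getD k 0) := by simpa [pvP] using hp
      have hcondE : ¬(S[k]?.getD 0 = F[k]?.getD 0) := by
        simpa [List.getD_eq_getElem?_getD] using hcond
      have hT : pvTmp S F (k + 1) = pvTmp S F k ++ [k] := by simp [pvTmp, hp]
      have hC : pvCh S F (k + 1) = pvCh S F k := by simp [pvCh, hp]
      rcases ih with ⟨h1, h2, hr⟩ | ⟨h1, h2, hr⟩ | ⟨c, p, h1, h2, hr⟩ | ⟨hcfg, p, s, o, hr⟩ | ⟨hb, hr⟩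
      · -- (a) empty → (b) first run opens
        right; left
        refine ⟨by rw [hC]; exact h1, by rw [hT, h2]; simp, ?_⟩
        rw [pvRunB_append, hr, hT, h2]
        simp [pvRunB, pvInit, hcondE, pvVals]
      · -- (b) first run grows
        right; left
        refine ⟨by rw [hC]; exact h1, by rw [hT]; simp, ?_⟩
        rw [pvRunB_append, hr, hT]
        have hvne : pvVals F (pvTmp S F k) ≠ [] := by simp [pvVals, h2]
        have hgl : (pvVals F (pvTmp S F k)).getLast hvne = F.getD (k - 1) 0 := by
          rw [pvVals_getLast F _ h2, pvTmp_getLast S F k h2]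
        have hok : decide ((pvVals F (pvTmp S F k ++ [k])).Pairwise (· ≥ ·))
            = if F.getD k 0 > F.getD (k - 1) 0 then false
              else decide ((pvVals F (pvTmp S F k)).Pairwise (· ≥ ·)) := by
          have : pvVals F (pvTmp S F k ++ [k]) = pvVals F (pvTmp S F k) ++ [F.getD k 0] := by
            simp [pvVals]
          rw [this, pvPairConcat _ _ hvne, hgl]
        have hlen : decide ((pvTmp S F k ++ [k]).length = 1) = false := by
          rw [decide_eq_false_iff_not]
          simp only [List.length_append, List.length_cons, List.length_nil]
          have := List.length_pos_of_ne_nil h2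
          omega
        simp [pvRunB, hcondE, hok, h2]
      · -- (c) gap → second mismatch: singleton first run goes to state 3, else dead
        by_cases hc : c.length = 1
        · right; right; right; left
          refine ⟨Or.inl ⟨c, by rw [hC]; exact h1, hc, by rw [hT, h2]; simp⟩, ?_⟩
          rw [pvRunB_append, hr]
          refine ⟨F.getD k 0, decide (c.length = 1), decide ((pvVals F c).Pairwise (· ≥ ·)), ?_⟩
          simp [pvRunB, hcondE, hc]
        · right; right; right; right
          constructor
          · unfold pvBad
            have hA : pvAll S F (k + 1) = [c, [k]] := by
              simp [pvAll, hT, hC, h1, h2]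
            rw [hA]
            right
            refine ⟨by simp, ?_⟩
            rintro ⟨hx, _⟩
            simp at hx
            exact hc hx
          · rw [pvRunB_append, hr]
            simp [pvRunB, hcondE, hc]
      · -- (d) any further mismatch is dead
        right; right; right; right
        constructor
        · unfold pvBad
          rcases hcfg with ⟨c, h1, hc1, ht1⟩ | ⟨c, t, h1, hc1, ht1, h2⟩
          · have hA : pvAll S F (k + 1) = [c, pvTmp S F k ++ [k]] := by
              simp [pvAll, hT, hC, h1]
            rw [hA]
            right
            refine ⟨by simp, ?_⟩
            rintro ⟨_, habs⟩
            simp only [List.getD_cons_succ, List.getD_cons_zero, List.length_append,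
              List.length_cons, List.length_nil] at habs
            omega
          · have hA : pvAll S F (k + 1) = [c, t, [k]] := by
              simp [pvAll, hT, hC, h1, h2]
            rw [hA]
            left; simp
        · rw [pvRunB_append, hr]
          simp [pvRunB, hcondE]
      · -- (e) dead stays dead
        right; right; right; right
        refine ⟨pvBad_succ S F k hb, ?_⟩
        rw [pvRunB_append, hr]
    · have hp' : pvP S F k = false := by simpa using hp
      have hcond : S.getD k 0 = F.getD k 0 := by simpa [pvP] using hp'
      have hcondE : S[k]?.getD 0 = F[k]?.getD 0 := by
        simpa [List.getD_eq_getElem?_getD] using hcond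
      have hT : pvTmp S F (k + 1) = [] := by simp [pvTmp, hp']
      rcases ih with ⟨h1, h2, hr⟩ | ⟨h1, h2, hr⟩ | ⟨c, p, h1, h2, hr⟩ | ⟨hcfg, p, s, o, hr⟩ | ⟨hb, hr⟩
      · -- (a) stays (a)
        left
        have hC : pvCh S F (k + 1) = [] := by simp [pvCh, hp', h2, h1]
        refine ⟨hC, hT, ?_⟩
        rw [pvRunB_append, hr]
        simp [pvRunB, pvInit, hcondE]
      · -- (b) run closes → (c)
        right; right; left
        have hC : pvCh S F (k + 1) = [pvTmp S F k] := by simp [pvCh, hp', h1, h2]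
        refine ⟨pvTmp S F k, F.getD (k - 1) 0, hC, hT, ?_⟩
        rw [pvRunB_append, hr]
        simp [pvRunB, hcondE]
      · -- (c) stays (c)
        right; right; left
        have hC : pvCh S F (k + 1) = [c] := by simp [pvCh, hp', h2, h1]
        refine ⟨c, p, hC, hT, ?_⟩
        rw [pvRunB_append, hr]
        simp [pvRunB, hcondE]
      · -- (d) stays (d) (the open singleton closes, or nothing changes)
        right; right; right; left
        constructor
        · rcases hcfg with ⟨c, h1, hc1, ht1⟩ | ⟨c, t, h1, hc1, ht1, h2⟩
          · right
            have htne : pvTmp S F k ≠ [] := by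
              intro h0; rw [h0] at ht1; simp at ht1
            have hC : pvCh S F (k + 1) = [c, pvTmp S F k] := by
              simp [pvCh, hp', htne, h1]
            exact ⟨c, pvTmp S F k, hC, hc1, ht1, hT⟩
          · right
            have hC : pvCh S F (k + 1) = [c, t] := by simp [pvCh, hp', h2, h1]
            exact ⟨c, t, hC, hc1, ht1, hT⟩
        · refine ⟨p, s, o, ?_⟩
          rw [pvRunB_append, hr]
          simp [pvRunB, hcondE]
      · -- (e) dead stays dead
        right; right; right; right
        refine ⟨pvBad_succ S F k hb, ?_⟩
        rw [pvRunB_append, hr]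

theorem pvZipTailAll (l : List Int) :
    ((l.zip l.tail).all (fun p => decide (p.1 ≥ p.2))) = true ↔ l.Pairwise (· ≥ ·) := by
  rw [← List.isChain_iff_pairwise]
  induction l with
  | nil => simp
  | cons x xs ih =>
    cases xs with
    | nil => simp
    | cons y t =>
      simp only [List.tail_cons, List.zip_cons_cons, List.all_cons, List.isChain_cons_cons] at *
      rw [Bool.and_eq_true, ih]
      simp

theorem pvRevSorted (l : List Int) :
    decide (l.reverse = PySem.List.sorted l (fun x => x) false)
      = (l.zip l.tail).all (fun p => decide (p.1 ≥ p.2)) := by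
  apply Bool.eq_iff_iff.mpr
  rw [pvZipTailAll, decide_eq_true_eq]
  constructor
  · intro h
    have hp := PySem.List.sorted_pairwise l (fun x => x)
    rw [← h, List.pairwise_reverse] at hp
    exact hp.imp (fun hab => hab)
  · intro h
    have hpair : l.reverse.Pairwise (fun a b => a ≤ b) := by
      rw [List.pairwise_reverse]
      exact h.imp (fun hab => hab)
    exact (PySem.List.sorted_id_eq_of_perm_of_pairwise l l.reverse (List.reverse_perm l) hpair).symm

theorem pvPairDecEq (v : List Int) :
    ((v.zip v.tail).all (fun p => decide (p.1 ≥ p.2))) = decide (v.Pairwise (· ≥ ·)) := by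
  apply Bool.eq_iff_iff.mpr
  rw [pvZipTailAll, decide_eq_true_eq]

-- ===== VERDICT =====
theorem Football_spec : Claim_equal_Football := by
  unfold Claim_equal_Football
  intro F N _ hPre
  unfold Spec_Football
  simp only [Football, Football_alt]
  set S := PySem.List.sorted F (fun x => x) false with hS
  have hmap : PySem.List.pyRange 0 N 1 = (List.range N.toNat).map (fun (k : Nat) => (k : Int)) := by
    rw [PySem.List.pyRange_one]
    simp
  -- A side: the fold over the chain configuration; B side: the state machine
  rw [hmap, List.foldl_map]
  simp only [PySem.List.pyGetD_natCast]
  rw [pvFoldA S F N.toNat, pvLoop_eq]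
  set n := N.toNat with hn
  dsimp only
  rw [show ((0 : Int), (0 : Int), true, true) = pvInit from rfl]
  have hBl : (if (pvVals F (pvTmp S F n)).length > 0
        then List.map (pvVals F) (pvCh S F n) ++ [pvVals F (pvTmp S F n)]
        else List.map (pvVals F) (pvCh S F n))
      = List.map (pvVals F) (pvAll S F n) := by
    rw [pvAll]
    by_cases ht : pvTmp S F n = []
    · rw [ht]; simp [pvVals]
    · rw [if_pos (by simp [pvVals, List.length_pos_iff.mpr ht]), if_neg ht, List.map_append]
      simp
  rw [hBl]
  rcases pvInv S F n with ⟨h1, h2, hr⟩ | ⟨h1, h2, hr⟩ | ⟨c, p, h1, h2, hr⟩ | ⟨hcfg, p, s, o, hr⟩ | ⟨hb, hr⟩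
  · -- no mismatches: both false
    have hA : pvAll S F n = [] := by simp [pvAll, h1, h2]
    rw [hA, hr]
    simp [pvFinish, pvInit]
  · -- one open chain: A's reverse==sorted test vs B's ok flag
    have hA : pvAll S F n = [pvTmp S F n] := by simp [pvAll, h1, h2]
    rw [hA, hr]
    simp only [List.map_cons, List.map_nil, List.length_cons, List.length_nil,
      PySem.List.pyGetD_zero_cons]
    rw [if_pos (by simp)]
    rw [pvRevSorted, pvPairDecEq]
    simp [pvFinish]
  · -- one closed chain: same comparison
    have hA : pvAll S F n = [c] := by simp [pvAll, h1, h2]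
    rw [hA, hr]
    simp only [List.map_cons, List.map_nil, List.length_cons, List.length_nil,
      PySem.List.pyGetD_zero_cons]
    rw [if_pos (by simp)]
    rw [pvRevSorted, pvPairDecEq]
    simp [pvFinish]
  · -- two singleton chains: both true
    have hA : ∃ c t, pvAll S F n = [c, t] ∧ c.length = 1 ∧ t.length = 1 := by
      rcases hcfg with ⟨c, h1, hc1, ht1⟩ | ⟨c, t, h1, hc1, ht1, h2⟩
      · refine ⟨c, pvTmp S F n, ?_, hc1, ht1⟩
        have htne : pvTmp S F n ≠ [] := by
          intro h0; rw [h0] at ht1; simp at ht1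
        simp [pvAll, h1, htne]
      · exact ⟨c, t, by simp [pvAll, h1, h2], hc1, ht1⟩
    obtain ⟨c, t, hA, hc1, ht1⟩ := hA
    rw [hA, hr]
    simp [PySem.List.pyGetD, PySem.List.pyGet?, PySem.List.pyIdx?, pvFinish, pvVals, hc1, ht1]
  · -- hopeless configuration: both false
    rw [hr]
    unfold pvBad at hb
    rcases hb with hb | ⟨hb2, hb3⟩
    · rw [if_neg (by simp only [List.length_map]; omega),
         if_neg (by simp only [List.length_map]; omega)]
      simp [pvFinish]
    · obtain ⟨c, t, hct⟩ := List.length_eq_two.mp hb2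
      rw [hct] at hb3 ⊢
      simp only [List.getD_cons_zero, List.getD_cons_succ] at hb3
      by_cases h0 : c.length = 1 <;> by_cases h1 : t.length = 1
      · exact absurd ⟨h0, h1⟩ hb3
      all_goals
        simp [PySem.List.pyGetD, PySem.List.pyGet?, PySem.List.pyIdx?, pvFinish, pvVals, h0, h1]
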